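-- pv_equiv track=rewrite | github.com/Kappa63/CodeWars | Python/6 Kyu.py | next_multiple_of_five
-- ===== SOURCE A (Python) =====
-- def next_multiple_of_five(n):
--     b = bin(n)
--     o = "p0"
--     if not n: return 5
--     Path = {"p0":{"0":"p0","1":"p1"},
--             "p1":{"0":"p2","1":"p3"},
--             "p2":{"0":"p4","1":"p0"},
--             "p3":{"0":"p1","1":"p2"},
--             "p4":{"0":"p3","1":"p4"}}
--     Fin = {"p0":"0","p1":"01","p2":"1","p3":"11","p4":"011"}
--     for i in b[2:]: o = Path[o][i]
--     return int(b+Fin[o],2)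
-- ===== SOURCE B (Python) =====
-- def next_multiple_of_five(n):
--     if not n:
--         return 5
--     # Search for the shortest, then smallest, bit-suffix making a multiple of 5.
--     # A suffix of length <= 3 always exists (v ranges over all residues mod 5).
--     for L in range(1, 4):
--         for v in range(2 ** L):
--             x = n * 2 ** L + v
--             if x % 5 == 0:
--                 return x
-- ===== Notes on version B (the rewrite author's own statement) =====
-- stated objective: simpler
-- what changed: Replaced A's binary-string construction, per-bit DFA over a nested state dict and suffix lookup table by a direct arithmetic search: try all bit-suffixes of length 1..3 (shortest first, smallest value first) and return the first n*2**L+v divisible by 5.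
import Mathlib
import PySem

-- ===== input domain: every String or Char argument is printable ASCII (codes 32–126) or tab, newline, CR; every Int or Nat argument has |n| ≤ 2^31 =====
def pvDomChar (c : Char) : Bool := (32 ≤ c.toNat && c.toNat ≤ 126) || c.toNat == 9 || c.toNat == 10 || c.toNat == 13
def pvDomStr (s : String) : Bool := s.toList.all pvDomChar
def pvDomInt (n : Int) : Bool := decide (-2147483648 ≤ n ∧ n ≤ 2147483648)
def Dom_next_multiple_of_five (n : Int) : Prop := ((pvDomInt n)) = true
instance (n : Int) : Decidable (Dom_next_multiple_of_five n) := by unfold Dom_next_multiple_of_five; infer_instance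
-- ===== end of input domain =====

-- B replaces A's binary-string DFA and suffix table by a direct arithmetic search (mod 5)
-- over the suffixes of length 1..3 — objective: simpler (no string building, no state machine).

-- ===== PORT A =====
-- the two dict literals of A
def pvPath : PySem.Dict String (PySem.Dict String String) :=
  PySem.Dict.ofList
    [("p0", PySem.Dict.ofList [("0","p0"),("1","p1")]),
     ("p1", PySem.Dict.ofList [("0","p2"),("1","p3")]),
     ("p2", PySem.Dict.ofList [("0","p4"),("1","p0")]),
     ("p3", PySem.Dict.ofList [("0","p1"),("1","p2")]),
     ("p4", PySem.Dict.ofList [("0","p3"),("1","p4")])]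

def pvFin : PySem.Dict String String :=
  PySem.Dict.ofList [("p0","0"),("p1","01"),("p2","1"),("p3","11"),("p4","011")]

-- one step of A's loop body: o = Path[o][i]; none = KeyError (reached only for n < 0, outside Pre_)
def pvStep (acc : Option String) (c : Char) : Option String :=
  acc.bind fun o => (pvPath.get? o).bind fun row => row.get? (String.ofList [c])

-- hand port of int(s, 2), exact on the strings A builds for n ≥ 0: "0b" followed by binary digits
def pvBitsFrom (a : Int) (cs : List Char) : Int :=
  cs.foldl (fun a c => 2 * a + (if c = '1' then 1 else 0)) a

def pvIntBase2 (cs : List Char) : Int :=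
  match cs with
  | '0' :: 'b' :: ds => pvBitsFrom 0 ds
  | _ => 0   -- shapes A never builds for n ≥ 0

def next_multiple_of_five (n : Int) : Int :=
  let b := PySem.Int.toBinChars0b n            -- b = bin(n), as characters
  if n == 0 then 5                             -- if not n: return 5
  else
    match (b.drop 2).foldl pvStep (some "p0") with   -- for i in b[2:]: o = Path[o][i]
    | none => 0                                -- KeyError in Python (n < 0), outside Pre_
    | some st =>
      match pvFin.get? st with
      | none => 0                              -- KeyError (st is always a table key: unreachable)
      | some suf => pvIntBase2 (b ++ suf.toList)   -- return int(b + Fin[o], 2)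

-- ===== PORT B =====
def next_multiple_of_five_alt (n : Int) : Int :=
  if n == 0 then 5
  else
    match (PySem.List.pyRange 1 4 1).findSome? (fun L =>
        (PySem.List.pyRange 0 (2 ^ L.toNat) 1).findSome? (fun v =>
          let x := n * 2 ^ L.toNat + v
          if PySem.Int.mod x 5 == 0 then some x else none)) with
    | some x => x
    | none => 0                                -- never reached: length 3 always succeeds

-- ===== PRECONDITION & SPEC =====
-- Pre_ excludes n < 0, where A raises KeyError (bin(n) then starts with "-0b" and the DFA
-- has no key for '-' / 'b').
def Pre_next_multiple_of_five (n : Int) : Prop := 0 ≤ n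
instance (n : Int) : Decidable (Pre_next_multiple_of_five n) := by
  unfold Pre_next_multiple_of_five; infer_instance

def pvWitness_next_multiple_of_five : Int := 7

def Spec_next_multiple_of_five (n : Int) (out : Int) : Prop := out = next_multiple_of_five_alt n
instance (n : Int) (out : Int) : Decidable (Spec_next_multiple_of_five n out) := by
  unfold Spec_next_multiple_of_five; infer_instance

-- ===== CLAIM (what is proved, stated in full; the proofs are below) =====
def Claim_equal_next_multiple_of_five : Prop :=
  ∀ (n : Int), Dom_next_multiple_of_five n → Pre_next_multiple_of_five n →
    Spec_next_multiple_of_five n (next_multiple_of_five n)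

-- ===== LEMMAS AND PROOFS =====

-- closed form both programs compute for n ≠ 0 (for A only proved on 0 < n)
def pvClosed (n : Int) : Int :=
  if n % 5 = 0 then 2*n
  else if n % 5 = 1 then 4*n+1
  else if n % 5 = 2 then 2*n+1
  else if n % 5 = 3 then 4*n+3
  else 8*n+3

-- recursive binary digits, equal to Nat.toDigits 2
def pvBin (m : Nat) : List Char :=
  if _h : m < 2 then [Nat.digitChar m]
  else pvBin (m / 2) ++ [Nat.digitChar (m % 2)]
termination_by m
decreasing_by omega

theorem pvToDigitsCore_acc (f : Nat) : ∀ (n : Nat) (l : List Char),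
    Nat.toDigitsCore 2 f n l = Nat.toDigitsCore 2 f n [] ++ l := by
  induction f with
  | zero => intro n l; simp [Nat.toDigitsCore]
  | succ f ih =>
    intro n l
    simp only [Nat.toDigitsCore]
    by_cases h : n / 2 = 0
    · simp [h]
    · simp only [h, if_false]
      rw [ih (n / 2) (Nat.digitChar (n % 2) :: l), ih (n / 2) [Nat.digitChar (n % 2)]]
      simp

theorem pvToDigitsCore_eq_pvBin (f : Nat) : ∀ (n : Nat), n < f →
    Nat.toDigitsCore 2 f n [] = pvBin n := by
  induction f with
  | zero => intro n h; omega
  | succ f ih =>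
    intro n hn
    simp only [Nat.toDigitsCore]
    by_cases h : n / 2 = 0
    · have h2 : n < 2 := by omega
      rw [pvBin]
      simp [h, h2, Nat.mod_eq_of_lt h2]
    · have h2 : ¬ n < 2 := by omega
      simp only [h, if_false]
      rw [pvToDigitsCore_acc, ih (n / 2) (by omega)]
      conv_rhs => rw [pvBin]
      simp [h2]

theorem pvToDigits_eq (n : Nat) : Nat.toDigits 2 n = pvBin n := by
  rw [Nat.toDigits]
  exact pvToDigitsCore_eq_pvBin (n + 1) n (by omega)

theorem pvBin_binary (m : Nat) : ∀ c ∈ pvBin m, c = '0' ∨ c = '1' := by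
  induction m using Nat.strong_induction_on with
  | _ m ih =>
    rw [pvBin]
    by_cases h : m < 2
    · interval_cases m <;> simp_all <;> decide
    · simp only [h, dif_neg, not_false_iff]
      intro c hc
      rcases List.mem_append.mp hc with h1 | h1
      · exact ih (m / 2) (by omega) c h1
      · have h2 : m % 2 = 0 ∨ m % 2 = 1 := by omega
        simp only [List.mem_singleton] at h1
        rcases h2 with h2 | h2 <;> rw [h1, h2] <;> [left; right] <;> rfl

theorem pvBitsFrom_pvBin (m : Nat) : ∀ a : Int,
    pvBitsFrom a (pvBin m) = a * 2 ^ (pvBin m).length + m := by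
  induction m using Nat.strong_induction_on with
  | _ m ih =>
    intro a
    rw [pvBin]
    by_cases h : m < 2
    · interval_cases m <;> simp [pvBitsFrom, Nat.digitChar] <;> ring
    · simp only [h, dif_neg, not_false_iff]
      rw [pvBitsFrom, List.foldl_append]
      rw [show List.foldl (fun a c => 2 * a + if c = '1' then 1 else 0) a (pvBin (m / 2)) =
            a * 2 ^ (pvBin (m / 2)).length + ((m / 2 : Nat) : Int) from ih (m / 2) (by omega) a]
      have hm2 : ((m / 2 : Nat) : Int) * 2 + ((m % 2 : Nat) : Int) = (m : Int) := by
        push_cast; omega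
      have h2 : m % 2 = 0 ∨ m % 2 = 1 := by omega
      rcases h2 with h2 | h2 <;> rw [h2] at hm2 <;> push_cast at hm2 <;>
        simp [h2, List.length_append, pow_succ, Nat.digitChar] <;> linear_combination hm2

-- state names of A's DFA, indexed by the remainder they represent
def pvPname (r : Int) : String :=
  if r = 0 then "p0" else if r = 1 then "p1" else if r = 2 then "p2"
  else if r = 3 then "p3" else "p4"

theorem pvDFA (l : List Char) (hl : ∀ c ∈ l, c = '0' ∨ c = '1') : ∀ v : Int,
    l.foldl pvStep (some (pvPname (v % 5))) = some (pvPname (pvBitsFrom v l % 5)) := by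
  induction l with
  | nil => intro v; simp [pvBitsFrom]
  | cons c l ih =>
    intro v
    have hc := hl c List.mem_cons_self
    have hl' : ∀ c ∈ l, c = '0' ∨ c = '1' := fun c hc => hl c (List.mem_cons_of_mem _ hc)
    have hv : v % 5 = 0 ∨ v % 5 = 1 ∨ v % 5 = 2 ∨ v % 5 = 3 ∨ v % 5 = 4 := by omega
    rcases hc with hc | hc <;> subst hc
    · rcases hv with hv | hv | hv | hv | hv
      · rw [List.foldl_cons, hv, show pvStep (some (pvPname 0)) '0' =
              some (pvPname ((2 * v + 0) % 5)) from by
            rw [show (2 * v + 0) % 5 = 0 from by omega]; decide]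
        simpa [pvBitsFrom] using ih hl' (2 * v + 0)
      · rw [List.foldl_cons, hv, show pvStep (some (pvPname 1)) '0' =
              some (pvPname ((2 * v + 0) % 5)) from by
            rw [show (2 * v + 0) % 5 = 2 from by omega]; decide]
        simpa [pvBitsFrom] using ih hl' (2 * v + 0)
      · rw [List.foldl_cons, hv, show pvStep (some (pvPname 2)) '0' =
              some (pvPname ((2 * v + 0) % 5)) from by
            rw [show (2 * v + 0) % 5 = 4 from by omega]; decide]
        simpa [pvBitsFrom] using ih hl' (2 * v + 0)
      · rw [List.foldl_cons, hv, show pvStep (some (pvPname 3)) '0' =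
              some (pvPname ((2 * v + 0) % 5)) from by
            rw [show (2 * v + 0) % 5 = 1 from by omega]; decide]
        simpa [pvBitsFrom] using ih hl' (2 * v + 0)
      · rw [List.foldl_cons, hv, show pvStep (some (pvPname 4)) '0' =
              some (pvPname ((2 * v + 0) % 5)) from by
            rw [show (2 * v + 0) % 5 = 3 from by omega]; decide]
        simpa [pvBitsFrom] using ih hl' (2 * v + 0)
    · rcases hv with hv | hv | hv | hv | hv
      · rw [List.foldl_cons, hv, show pvStep (some (pvPname 0)) '1' =
              some (pvPname ((2 * v + 1) % 5)) from by
            rw [show (2 * v + 1) % 5 = 1 from by omega]; decide]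
        simpa [pvBitsFrom] using ih hl' (2 * v + 1)
      · rw [List.foldl_cons, hv, show pvStep (some (pvPname 1)) '1' =
              some (pvPname ((2 * v + 1) % 5)) from by
            rw [show (2 * v + 1) % 5 = 3 from by omega]; decide]
        simpa [pvBitsFrom] using ih hl' (2 * v + 1)
      · rw [List.foldl_cons, hv, show pvStep (some (pvPname 2)) '1' =
              some (pvPname ((2 * v + 1) % 5)) from by
            rw [show (2 * v + 1) % 5 = 0 from by omega]; decide]
        simpa [pvBitsFrom] using ih hl' (2 * v + 1)
      · rw [List.foldl_cons, hv, show pvStep (some (pvPname 3)) '1' =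
              some (pvPname ((2 * v + 1) % 5)) from by
            rw [show (2 * v + 1) % 5 = 2 from by omega]; decide]
        simpa [pvBitsFrom] using ih hl' (2 * v + 1)
      · rw [List.foldl_cons, hv, show pvStep (some (pvPname 4)) '1' =
              some (pvPname ((2 * v + 1) % 5)) from by
            rw [show (2 * v + 1) % 5 = 4 from by omega]; decide]
        simpa [pvBitsFrom] using ih hl' (2 * v + 1)

theorem pvBitsFrom_append (a : Int) (xs ys : List Char) :
    pvBitsFrom a (xs ++ ys) = pvBitsFrom (pvBitsFrom a xs) ys := by
  simp [pvBitsFrom, List.foldl_append]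

theorem pvA_closed (n : Int) (hn : 0 < n) : next_multiple_of_five n = pvClosed n := by
  have hmn : (n.toNat : Int) = n := by omega
  have hb : PySem.Int.toBinChars0b n = '0' :: 'b' :: pvBin n.toNat := by
    rw [PySem.Int.toBinChars0b, if_neg (by omega), pvToDigits_eq]
  have hval : pvBitsFrom 0 (pvBin n.toNat) = n := by
    rw [pvBitsFrom_pvBin, hmn]; ring
  have hfold := pvDFA (pvBin n.toNat) (pvBin_binary n.toNat) 0
  rw [hval, show pvPname (0 % 5) = "p0" from rfl] at hfold
  simp only [next_multiple_of_five]
  rw [hb, if_neg (by simp only [beq_iff_eq]; omega)]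
  simp only [List.drop_succ_cons, List.drop_zero]
  rw [hfold]
  have h5 : n % 5 = 0 ∨ n % 5 = 1 ∨ n % 5 = 2 ∨ n % 5 = 3 ∨ n % 5 = 4 := by omega
  rcases h5 with hr | hr | hr | hr | hr <;> rw [hr]
  · simp only [show pvFin.get? (pvPname 0) = some "0" from by decide]
    show pvIntBase2 (('0' :: 'b' :: pvBin n.toNat) ++ "0".toList) = pvClosed n
    rw [show ('0' :: 'b' :: pvBin n.toNat) ++ "0".toList =
          '0' :: 'b' :: (pvBin n.toNat ++ ['0']) from by simp]
    show pvBitsFrom 0 (pvBin n.toNat ++ ['0']) = pvClosed n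
    rw [pvBitsFrom_append, hval]
    simp [pvBitsFrom, pvClosed, hr]; try ring
  · simp only [show pvFin.get? (pvPname 1) = some "01" from by decide]
    show pvIntBase2 (('0' :: 'b' :: pvBin n.toNat) ++ "01".toList) = pvClosed n
    rw [show ('0' :: 'b' :: pvBin n.toNat) ++ "01".toList =
          '0' :: 'b' :: (pvBin n.toNat ++ ['0', '1']) from by simp]
    show pvBitsFrom 0 (pvBin n.toNat ++ ['0', '1']) = pvClosed n
    rw [pvBitsFrom_append, hval]
    simp [pvBitsFrom, pvClosed, hr]; try ring
  · simp only [show pvFin.get? (pvPname 2) = some "1" from by decide]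
    show pvIntBase2 (('0' :: 'b' :: pvBin n.toNat) ++ "1".toList) = pvClosed n
    rw [show ('0' :: 'b' :: pvBin n.toNat) ++ "1".toList =
          '0' :: 'b' :: (pvBin n.toNat ++ ['1']) from by simp]
    show pvBitsFrom 0 (pvBin n.toNat ++ ['1']) = pvClosed n
    rw [pvBitsFrom_append, hval]
    simp [pvBitsFrom, pvClosed, hr]; try ring
  · simp only [show pvFin.get? (pvPname 3) = some "11" from by decide]
    show pvIntBase2 (('0' :: 'b' :: pvBin n.toNat) ++ "11".toList) = pvClosed n
    rw [show ('0' :: 'b' :: pvBin n.toNat) ++ "11".toList =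
          '0' :: 'b' :: (pvBin n.toNat ++ ['1', '1']) from by simp]
    show pvBitsFrom 0 (pvBin n.toNat ++ ['1', '1']) = pvClosed n
    rw [pvBitsFrom_append, hval]
    simp [pvBitsFrom, pvClosed, hr]; try ring
  · simp only [show pvFin.get? (pvPname 4) = some "011" from by decide]
    show pvIntBase2 (('0' :: 'b' :: pvBin n.toNat) ++ "011".toList) = pvClosed n
    rw [show ('0' :: 'b' :: pvBin n.toNat) ++ "011".toList =
          '0' :: 'b' :: (pvBin n.toNat ++ ['0', '1', '1']) from by simp]
    show pvBitsFrom 0 (pvBin n.toNat ++ ['0', '1', '1']) = pvClosed n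
    rw [pvBitsFrom_append, hval]
    simp [pvBitsFrom, pvClosed, hr]; try ring

theorem pvMod5 (x : Int) : (PySem.Int.mod x 5 == 0) = decide (x % 5 = 0) := by
  rw [PySem.Int.mod_eq_emod_of_pos (by norm_num)]
  by_cases h : x % 5 = 0 <;> simp [h]

theorem pvB_closed (n : Int) (hn : n ≠ 0) : next_multiple_of_five_alt n = pvClosed n := by
  simp only [next_multiple_of_five_alt]
  rw [if_neg (by simp only [beq_iff_eq]; exact hn)]
  rw [show PySem.List.pyRange 1 4 1 = [1, 2, 3] from by decide]
  simp only [List.findSome?, pvMod5, Int.toNat_one, pow_one]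
  rw [show PySem.List.pyRange 0 2 = [0, 1] from by decide,
      show PySem.List.pyRange 0 (2 ^ Int.toNat 2) = [0, 1, 2, 3] from by decide,
      show PySem.List.pyRange 0 (2 ^ Int.toNat 3) = [0, 1, 2, 3, 4, 5, 6, 7] from by decide]
  simp only [List.findSome?]
  simp
  have h5 : n % 5 = 0 ∨ n % 5 = 1 ∨ n % 5 = 2 ∨ n % 5 = 3 ∨ n % 5 = 4 := by omega
  rcases h5 with hr | hr | hr | hr | hr
  · simp [show (5:Int) ∣ n * 2 from by omega, pvClosed, hr]; ring
  · simp [show ¬ (5:Int) ∣ n * 2 from by omega,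
          show ¬ (5:Int) ∣ n * 2 + 1 from by omega,
          show ¬ (5:Int) ∣ n * 4 from by omega,
          show (5:Int) ∣ n * 4 + 1 from by omega, pvClosed, hr]
    ring
  · simp [show ¬ (5:Int) ∣ n * 2 from by omega,
          show (5:Int) ∣ n * 2 + 1 from by omega, pvClosed, hr]
    ring
  · simp [show ¬ (5:Int) ∣ n * 2 from by omega,
          show ¬ (5:Int) ∣ n * 2 + 1 from by omega,
          show ¬ (5:Int) ∣ n * 4 from by omega,
          show ¬ (5:Int) ∣ n * 4 + 1 from by omega,
          show ¬ (5:Int) ∣ n * 4 + 2 from by omega,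
          show (5:Int) ∣ n * 4 + 3 from by omega, pvClosed, hr]
    ring
  · simp [show ¬ (5:Int) ∣ n * 2 from by omega,
          show ¬ (5:Int) ∣ n * 2 + 1 from by omega,
          show ¬ (5:Int) ∣ n * 4 from by omega,
          show ¬ (5:Int) ∣ n * 4 + 1 from by omega,
          show ¬ (5:Int) ∣ n * 4 + 2 from by omega,
          show ¬ (5:Int) ∣ n * 4 + 3 from by omega,
          show ¬ (5:Int) ∣ n * 8 from by omega,
          show ¬ (5:Int) ∣ n * 8 + 1 from by omega,
          show ¬ (5:Int) ∣ n * 8 + 2 from by omega,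
          show (5:Int) ∣ n * 8 + 3 from by omega, pvClosed, hr]
    ring

-- ===== VERDICT (by name: the statement is the Claim_ definition above) =====
theorem next_multiple_of_five_spec : Claim_equal_next_multiple_of_five := by
  intro n _ hpre
  unfold Spec_next_multiple_of_five
  rcases eq_or_lt_of_le hpre with h0 | h0
  · rw [← h0]; rfl
  · rw [pvA_closed n h0, pvB_closed n (by omega)]
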